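-- pv_equiv track=rewrite | github.com/PiotrSCerebellum/AdventCalendar2023 | DecoderAdventDay1part2.py | decodeStringToNumbers
-- ===== SOURCE A (Python) =====
-- digit_dict = {
--   "zero": "0",
--   "one": "1",
--   "two": "2",
--   "three": "3",
--   "four": "4",
--   "five": "5",
--   "six": "6",
--   "seven": "7",
--   "eight": "8",
--   "nine": "9",
--    "0": "0",
--   "1": "1",
--   "2": "2",
--   "3": "3",
--   "4": "4",
--   "5": "5",
--   "6": "6",
--   "7": "7",
--   "8": "8",
--   "9": "9"
-- }
--
-- def decodeStringToNumbers(str):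
--     decodedString=" " * len(str)
--     for digit in digit_dict:
--         index = findIndexesOfStrings(str,digit)
--         if(index==[]):
--             continue
--         newstring=digit_dict[digit]
--         decodedString=replaceCharsAtIndexes(decodedString,index,newstring)
--     decodedString=decodedString.replace(" ","")
--     return decodedString
--
-- def replaceCharsAtIndexes(string,indexes,newstring):
--     for index in indexes:
--         string = string[:index] + newstring + string[index + 1:]
--     return string
--
-- def findIndexesOfStrings(string,substring):
--     return [i for i in range(len(string)) if string.startswith(substring, i)]
-- ===== SOURCE B (Python) =====
-- _WORDS_BY_FIRST = {
--     "z": (("zero", "0"),),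
--     "o": (("one", "1"),),
--     "t": (("two", "2"), ("three", "3")),
--     "f": (("four", "4"), ("five", "5")),
--     "s": (("six", "6"), ("seven", "7")),
--     "e": (("eight", "8"),),
--     "n": (("nine", "9"),),
-- }
-- _EMPTY = ()
--
-- def decodeStringToNumbers(str):
--     out = []
--     append = out.append
--     get = _WORDS_BY_FIRST.get
--     for i, c in enumerate(str):
--         if "0" <= c <= "9":
--             append(c)
--         else:
--             for word, digit in get(c, _EMPTY):
--                 if str.startswith(word, i):
--                     append(digit)
--                     break
--     return "".join(out)
-- ===== Notes on version B (the rewrite author's own statement) =====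
-- stated objective: faster
-- what changed: Instead of scanning the whole string once per dictionary key and splicing digit chars into a placeholder string of spaces (each splice rebuilding the string, then stripping the spaces), B makes a single left-to-right pass that emits each digit character directly and otherwise consults a small table keyed by the position's first character, so almost every position costs one dict lookup instead of 20 startswith tests.
import Mathlib
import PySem

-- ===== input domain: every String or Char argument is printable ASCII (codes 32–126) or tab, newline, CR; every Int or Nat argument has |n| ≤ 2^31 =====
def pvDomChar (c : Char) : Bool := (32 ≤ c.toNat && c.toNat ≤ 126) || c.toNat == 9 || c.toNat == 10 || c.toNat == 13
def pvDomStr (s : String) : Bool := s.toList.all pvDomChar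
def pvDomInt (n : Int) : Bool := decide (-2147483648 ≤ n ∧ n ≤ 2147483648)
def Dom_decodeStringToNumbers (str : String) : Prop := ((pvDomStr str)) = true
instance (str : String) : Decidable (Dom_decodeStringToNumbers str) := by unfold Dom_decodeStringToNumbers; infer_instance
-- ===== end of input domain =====

-- B replaces A's per-key whole-string scans with O(n) string splices into a space placeholder
-- (stripped of its spaces at the end) by one left-to-right pass: at each position it emits the
-- character itself if it is a digit, else the digit of the first token word found in a small
-- table keyed by the position's first character; same return value on every input.

-- ===== PORT A =====
-- digit_dict as an (insertion-ordered) key/value list; Python iterates the dict's keys and looks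
-- each one up, which (all keys being distinct) is exactly iterating the items; the one-character
-- value strings are held as Chars and wrapped [·] where A uses them as strings.
def pvDigitDict : List (List Char × Char) :=
  [("zero".toList, '0'), ("one".toList, '1'), ("two".toList, '2'), ("three".toList, '3'),
   ("four".toList, '4'), ("five".toList, '5'), ("six".toList, '6'), ("seven".toList, '7'),
   ("eight".toList, '8'), ("nine".toList, '9'),
   (['0'], '0'), (['1'], '1'), (['2'], '2'), (['3'], '3'), (['4'], '4'),
   (['5'], '5'), (['6'], '6'), (['7'], '7'), (['8'], '8'), (['9'], '9')]

-- string.startswith(sub, i): exact — Python reads the start argument as a slice bound, so the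
-- call is 'sub is a prefix of s[i:]'.
def pvStartswithFrom (s sub : List Char) (i : Int) : Bool :=
  PySem.Chars.startswith (PySem.List.slice s (some i) none) sub

def findIndexesOfStrings (s sub : List Char) : List Int :=
  (PySem.List.pyRange 0 s.length 1).filter (fun i => pvStartswithFrom s sub i)

def replaceCharsAtIndexes (s : List Char) (indexes : List Int) (newstring : List Char) : List Char :=
  indexes.foldl
    (fun st index => PySem.List.slice st none (some index) ++ newstring ++ PySem.List.slice st (some (index + 1)) none)
    s

def decodeStringToNumbers (str : String) : String :=
  let cs := str.toList
  let decoded0 := List.replicate cs.length ' '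
  let decoded := pvDigitDict.foldl
    (fun dec kd =>
      let index := findIndexesOfStrings cs kd.1
      if index = [] then dec
      else replaceCharsAtIndexes dec index [kd.2]) decoded0
  String.ofList (PySem.Chars.replace decoded [' '] [])

-- ===== PORT B =====
-- _WORDS_BY_FIRST: dict → association list (insertion order, first-match lookup)
def pvWordsByFirst : List (Char × List (List Char × Char)) :=
  [('z', [("zero".toList, '0')]),
   ('o', [("one".toList, '1')]),
   ('t', [("two".toList, '2'), ("three".toList, '3')]),
   ('f', [("four".toList, '4'), ("five".toList, '5')]),
   ('s', [("six".toList, '6'), ("seven".toList, '7')]),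
   ('e', [("eight".toList, '8')]),
   ('n', [("nine".toList, '9')])]

-- _WORDS_BY_FIRST.get(c, _EMPTY): first-match lookup with default
def pvBucket (c : Char) : List (List Char × Char) :=
  ((pvWordsByFirst.find? (fun e => e.1 == c)).map (·.2)).getD []

def decodeStringToNumbers_alt (str : String) : String :=
  let cs := str.toList
  let out := (PySem.List.enumerate cs).foldl
    (fun acc ic =>
      if '0' ≤ ic.2 ∧ ic.2 ≤ '9' then acc ++ [ic.2]
      else
        match (pvBucket ic.2).find? (fun kd => pvStartswithFrom cs kd.1 ic.1) with
        | some kd => acc ++ [kd.2]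
        | none => acc) []
  String.ofList out

-- ===== PRECONDITION & SPEC =====
def Spec_decodeStringToNumbers (str : String) (out : String) : Prop := out = decodeStringToNumbers_alt str
instance (str : String) (out : String) : Decidable (Spec_decodeStringToNumbers str out) := by unfold Spec_decodeStringToNumbers; infer_instance

-- ===== CLAIM (what is proved, stated in full; the proofs are below) =====
def Claim_equal_decodeStringToNumbers : Prop := ∀ (str : String), Dom_decodeStringToNumbers str → Spec_decodeStringToNumbers str (decodeStringToNumbers str)

-- ===== LEMMAS AND PROOFS =====

-- the digit emitted at position j: the value of the first dictionary key matching there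
def pvMatch (cs : List Char) (j : Nat) : Option Char :=
  (pvDigitDict.find? (fun kd => kd.1.isPrefixOf (List.drop j cs))).map (·.2)

theorem pvStartswithFrom_natCast (cs sub : List Char) (j : Nat) :
    pvStartswithFrom cs sub (j : Int) = sub.isPrefixOf (List.drop j cs) := by
  rw [pvStartswithFrom, PySem.List.slice_from cs (Int.natCast_nonneg j)]
  simp [PySem.Chars.startswith]

theorem pvFindIndexes_eq (cs sub : List Char) :
    findIndexesOfStrings cs sub =
      ((List.range cs.length).filter (fun j => sub.isPrefixOf (List.drop j cs))).map
        (fun (j : Nat) => (j : Int)) := by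
  rw [findIndexesOfStrings, PySem.List.pyRange_zero_natCast, List.filter_map]
  simp only [Function.comp_def, pvStartswithFrom_natCast]

theorem pvSplice_set (st : List Char) (c : Char) (j : Nat) (hj : j < st.length) :
    PySem.List.slice st none (some (j : Int)) ++ [c] ++
      PySem.List.slice st (some ((j : Int) + 1)) none = st.set j c := by
  rw [PySem.List.slice_to st (Int.natCast_nonneg j),
    PySem.List.slice_from st (by positivity)]
  rw [List.set_eq_take_append_cons_drop, if_pos hj]
  have h1 : ((j : Int)).toNat = j := Int.toNat_natCast j
  have h2 : ((j : Int) + 1).toNat = j + 1 := by omega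
  rw [h1, h2]; simp

theorem pvFoldlSet_length (c : Char) (ixs : List Nat) (st : List Char) :
    (ixs.foldl (fun s i => s.set i c) st).length = st.length := by
  induction ixs generalizing st with
  | nil => rfl
  | cons i t ih => simp [List.foldl_cons, ih]

theorem pvFoldlSet_getElem? (c : Char) (ixs : List Nat) (st : List Char)
    (h : ∀ i ∈ ixs, i < st.length) (j : Nat) :
    (ixs.foldl (fun s i => s.set i c) st)[j]? = if j ∈ ixs then some c else st[j]? := by
  induction ixs generalizing st with
  | nil => simp
  | cons i t ih =>
    rw [List.foldl_cons, ih _ (by intro x hx; rw [List.length_set]; exact h x (List.mem_cons_of_mem _ hx))]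
    have hi : i < st.length := h i List.mem_cons_self
    by_cases hjt : j ∈ t
    · simp [hjt]
    · by_cases hji : j = i
      · subst hji; simp [hjt, List.getElem?_set_self hi]
      · rw [List.getElem?_set, if_neg (show ¬ i = j from fun hc => hji hc.symm)]
        simp [hjt, hji]

theorem pvReplaceChars_eq (c : Char) (ixs : List Nat) (st : List Char)
    (h : ∀ i ∈ ixs, i < st.length) :
    replaceCharsAtIndexes st (ixs.map (fun (i : Nat) => (i : Int))) [c] =
      ixs.foldl (fun s i => s.set i c) st := by
  induction ixs generalizing st with
  | nil => rfl
  | cons i t ih =>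
    rw [replaceCharsAtIndexes] at *
    simp only [List.map_cons, List.foldl_cons]
    rw [pvSplice_set st c i (h i List.mem_cons_self)]
    exact ih _ (by intro x hx; rw [List.length_set]; exact h x (List.mem_cons_of_mem _ hx))

theorem pvKeyPrefix : ∀ k1 ∈ pvDigitDict, ∀ k2 ∈ pvDigitDict, k1.1 <+: k2.1 → k1 = k2 := by
  decide

theorem pvDisj {L : List (List Char × Char)} (hL : L ⊆ pvDigitDict) {t : List Char}
    {k1 k2 : List Char × Char} (h1 : k1 ∈ L) (h2 : k2 ∈ L)
    (p1 : k1.1 <+: t) (p2 : k2.1 <+: t) : k1 = k2 := by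
  rcases List.prefix_or_prefix_of_prefix p1 p2 with h | h
  · exact pvKeyPrefix k1 (hL h1) k2 (hL h2) h
  · exact (pvKeyPrefix k2 (hL h2) k1 (hL h1) h).symm

-- characterization of A's key loop: position j ends up holding the digit of the first
-- dictionary key matching at j, or keeps its old character
theorem pvLoop_char (cs : List Char) (L : List (List Char × Char)) (hL : L ⊆ pvDigitDict)
    (st : List Char) (hst : st.length = cs.length) :
    (L.foldl (fun dec kd =>
        let index := findIndexesOfStrings cs kd.1
        if index = [] then dec
        else replaceCharsAtIndexes dec index [kd.2]) st).length = cs.length ∧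
    ∀ j, j < cs.length →
      (L.foldl (fun dec kd =>
          let index := findIndexesOfStrings cs kd.1
          if index = [] then dec
          else replaceCharsAtIndexes dec index [kd.2]) st)[j]? =
        match L.find? (fun kd => kd.1.isPrefixOf (List.drop j cs)) with
        | some kd => some kd.2
        | none => st[j]? := by
  induction L generalizing st with
  | nil => exact ⟨hst, fun j _ => by simp⟩
  | cons k T ih =>
    have hk : k ∈ pvDigitDict := hL List.mem_cons_self
    have hT : T ⊆ pvDigitDict := fun x hx => hL (List.mem_cons_of_mem _ hx)
    -- the per-key step is a fold of List.set over the matching positions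
    set jxs : List Nat := (List.range cs.length).filter (fun j => k.1.isPrefixOf (List.drop j cs)) with hjxs
    have hbound : ∀ i ∈ jxs, i < st.length := by
      intro i hi; rw [hst]; exact List.mem_range.mp (List.mem_of_mem_filter hi)
    have hstep : (let index := findIndexesOfStrings cs k.1
        if index = [] then st else replaceCharsAtIndexes st index [k.2]) =
        jxs.foldl (fun s i => s.set i k.2) st := by
      show (if findIndexesOfStrings cs k.1 = [] then st
        else replaceCharsAtIndexes st (findIndexesOfStrings cs k.1) [k.2]) = _
      rw [pvFindIndexes_eq, ← hjxs]
      rcases eq_or_ne jxs [] with he | he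
      · rw [he]; simp
      · rw [if_neg (fun hc => he (List.map_eq_nil_iff.mp hc)),
          pvReplaceChars_eq k.2 jxs st hbound]
    have hst' : (jxs.foldl (fun s i => s.set i k.2) st).length = cs.length := by
      rw [pvFoldlSet_length]; exact hst
    obtain ⟨ihlen, ihget⟩ := ih hT (jxs.foldl (fun s i => s.set i k.2) st) hst'
    rw [List.foldl_cons, hstep]
    refine ⟨ihlen, fun j hj => ?_⟩
    rw [ihget j hj, pvFoldlSet_getElem? k.2 jxs st hbound j]
    have hjmem : j ∈ jxs ↔ k.1.isPrefixOf (List.drop j cs) = true := by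
      rw [hjxs, List.mem_filter, List.mem_range]; tauto
    by_cases hkj : k.1.isPrefixOf (List.drop j cs) = true
    · rw [List.find?_cons_of_pos (l := T)
        (show (fun kd => kd.1.isPrefixOf (List.drop j cs)) k = true from hkj)]
      cases hf : T.find? (fun kd => kd.1.isPrefixOf (List.drop j cs)) with
      | none => simp [hjmem.mpr hkj]
      | some kd =>
        have hmem := List.mem_of_find?_eq_some hf
        have hp := List.find?_some hf
        have : kd = k := pvDisj (List.cons_subset.mpr ⟨hk, hT⟩)
          (List.mem_cons_of_mem _ hmem) List.mem_cons_self
          (List.isPrefixOf_iff_prefix.mp hp) (List.isPrefixOf_iff_prefix.mp hkj)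
        simp [this]
    · rw [List.find?_cons_of_neg (l := T)
        (show ¬ (fun kd => kd.1.isPrefixOf (List.drop j cs)) k = true from hkj),
        if_neg (fun hc => hkj (hjmem.mp hc))]

-- removing every occurrence of a single character with str.replace is filtering it out
theorem pvReplaceGo_filter (c : Char) (l : List Char) : ∀ (fuel : Nat) (acc : List Char),
    l.length ≤ fuel →
    PySem.Chars.replace.go [c] [] fuel l acc = acc.reverse ++ l.filter (fun x => !(x == c)) := by
  induction l with
  | nil => intro fuel acc h; cases fuel <;> simp [PySem.Chars.replace.go]
  | cons x t ih =>
    intro fuel acc h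
    cases fuel with
    | zero => simp at h
    | succ f =>
      rw [PySem.Chars.replace.go]
      by_cases hx : x = c
      · subst hx
        simp only [List.isPrefixOf, beq_self_eq_true, Bool.true_and, if_pos]
        simp only [List.length_cons] at h
        simp only [List.length_cons, List.length_nil, List.drop_succ_cons, List.drop_zero,
          List.reverse_nil, List.nil_append]
        rw [ih f acc (by omega)]
        simp
      · have hpf : [c].isPrefixOf (x :: t) = false := by
          simp [List.isPrefixOf]; exact fun hh => absurd hh.symm hx
        rw [hpf]
        simp only [Bool.false_eq_true, if_false, List.length_cons] at *
        rw [ih f (x :: acc) (by omega)]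
        simp [hx]

theorem pvReplace_filter (c : Char) (l : List Char) :
    PySem.Chars.replace l [c] [] = l.filter (fun x => !(x == c)) := by
  rw [PySem.Chars.replace]
  simp only [List.isEmpty_cons, Bool.false_eq_true, if_false]
  rw [pvReplaceGo_filter c l l.length [] le_rfl]
  rfl

theorem pvValuesNotSpace : ∀ kd ∈ pvDigitDict, kd.2 ≠ ' ' := by decide

theorem pvMatch_ne_space (cs : List Char) (j : Nat) : pvMatch cs j ≠ some ' ' := by
  rw [pvMatch]
  cases hf : pvDigitDict.find? (fun kd => kd.1.isPrefixOf (List.drop j cs)) with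
  | none => simp
  | some kd =>
    have := pvValuesNotSpace kd (List.mem_of_find?_eq_some hf)
    simp [this]

-- filtering the placeholder ' ' out of the per-position map leaves exactly the matches
theorem pvFilter_map_getD (cs : List Char) (l : List Nat) :
    (l.map (fun j => (pvMatch cs j).getD ' ')).filter (fun x => !(x == ' ')) =
      l.filterMap (pvMatch cs) := by
  induction l with
  | nil => rfl
  | cons j t ih =>
    cases hm : pvMatch cs j with
    | none => simp [hm, ih]
    | some d =>
      have hd : d ≠ ' ' := fun hc => pvMatch_ne_space cs j (hc ▸ hm)
      simp [hm, hd, ih]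

-- per position, B's digit-test / first-character dispatch finds exactly the first matching
-- dictionary key
theorem pvBridge (c : Char) (rest : List Char) :
    (if '0' ≤ c ∧ c ≤ '9' then some c
     else ((pvBucket c).find? (fun kd => kd.1.isPrefixOf (c :: rest))).map (·.2)) =
      (pvDigitDict.find? (fun kd => kd.1.isPrefixOf (c :: rest))).map (·.2) := by
  by_cases hd : '0' ≤ c ∧ c ≤ '9'
  · rw [if_pos hd]
    have hof := Char.ofNat_toNat c
    have hb : 48 ≤ c.toNat ∧ c.toNat ≤ 57 := by
      obtain ⟨h1, h2⟩ := hd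
      rw [Char.le_def] at h1 h2
      exact ⟨UInt32.le_iff_toNat_le.mp h1, UInt32.le_iff_toNat_le.mp h2⟩
    obtain ⟨hb1, hb2⟩ := hb
    have hmem : c ∈ ['0', '1', '2', '3', '4', '5', '6', '7', '8', '9'] := by
      interval_cases h : c.toNat <;> rw [← hof] <;> decide
    fin_cases hmem <;> simp [pvDigitDict, List.find?, List.isPrefixOf]
  · rw [if_neg hd]
    have hne : ∀ d : Char, '0' ≤ d ∧ d ≤ '9' → (d == c) = false := by
      intro d hdd
      rw [beq_eq_false_iff_ne]
      rintro rfl; exact hd hdd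
    have h0 := hne '0' (by decide); have h1 := hne '1' (by decide)
    have h2 := hne '2' (by decide); have h3 := hne '3' (by decide)
    have h4 := hne '4' (by decide); have h5 := hne '5' (by decide)
    have h6 := hne '6' (by decide); have h7 := hne '7' (by decide)
    have h8 := hne '8' (by decide); have h9 := hne '9' (by decide)
    rcases eq_or_ne c 'z' with rfl | hz
    · cases hA : List.isPrefixOf ['e', 'r', 'o'] rest <;>
        simp [pvBucket, pvWordsByFirst, pvDigitDict, List.find?, List.isPrefixOf, hA]
    rcases eq_or_ne c 'o' with rfl | ho
    · cases hA : List.isPrefixOf ['n', 'e'] rest <;>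
        simp [pvBucket, pvWordsByFirst, pvDigitDict, List.find?, List.isPrefixOf, hA]
    rcases eq_or_ne c 't' with rfl | ht
    · cases hA : List.isPrefixOf ['w', 'o'] rest <;>
        cases hB : List.isPrefixOf ['h', 'r', 'e', 'e'] rest <;>
        simp [pvBucket, pvWordsByFirst, pvDigitDict, List.find?, List.isPrefixOf, hA, hB]
    rcases eq_or_ne c 'f' with rfl | hf
    · cases hA : List.isPrefixOf ['o', 'u', 'r'] rest <;>
        cases hB : List.isPrefixOf ['i', 'v', 'e'] rest <;>
        simp [pvBucket, pvWordsByFirst, pvDigitDict, List.find?, List.isPrefixOf, hA, hB]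
    rcases eq_or_ne c 's' with rfl | hs
    · cases hA : List.isPrefixOf ['i', 'x'] rest <;>
        cases hB : List.isPrefixOf ['e', 'v', 'e', 'n'] rest <;>
        simp [pvBucket, pvWordsByFirst, pvDigitDict, List.find?, List.isPrefixOf, hA, hB]
    rcases eq_or_ne c 'e' with rfl | he
    · cases hA : List.isPrefixOf ['i', 'g', 'h', 't'] rest <;>
        simp [pvBucket, pvWordsByFirst, pvDigitDict, List.find?, List.isPrefixOf, hA]
    rcases eq_or_ne c 'n' with rfl | hn
    · cases hA : List.isPrefixOf ['i', 'n', 'e'] rest <;>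
        simp [pvBucket, pvWordsByFirst, pvDigitDict, List.find?, List.isPrefixOf, hA]
    have gz : ('z' == c) = false := beq_eq_false_iff_ne.mpr (Ne.symm hz)
    have go : ('o' == c) = false := beq_eq_false_iff_ne.mpr (Ne.symm ho)
    have gt' : ('t' == c) = false := beq_eq_false_iff_ne.mpr (Ne.symm ht)
    have gf : ('f' == c) = false := beq_eq_false_iff_ne.mpr (Ne.symm hf)
    have gs : ('s' == c) = false := beq_eq_false_iff_ne.mpr (Ne.symm hs)
    have ge : ('e' == c) = false := beq_eq_false_iff_ne.mpr (Ne.symm he)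
    have gn : ('n' == c) = false := beq_eq_false_iff_ne.mpr (Ne.symm hn)
    simp [pvBucket, pvWordsByFirst, pvDigitDict, List.find?, List.isPrefixOf,
      gz, go, gt', gf, gs, ge, gn, h0, h1, h2, h3, h4, h5, h6, h7, h8, h9]

-- B's enumerate fold appends exactly the matched digits, in position order
theorem pvFoldB (cs : List Char) : ∀ (suf : List Char) (k : Nat) (acc : List Char),
    List.drop k cs = suf →
    ((PySem.List.enumerate suf (k : Int)).foldl
      (fun acc ic =>
        if '0' ≤ ic.2 ∧ ic.2 ≤ '9' then acc ++ [ic.2]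
        else
          match (pvBucket ic.2).find? (fun kd => pvStartswithFrom cs kd.1 ic.1) with
          | some kd => acc ++ [kd.2]
          | none => acc) acc) =
      acc ++ (List.range' k suf.length).filterMap (pvMatch cs) := by
  intro suf
  induction suf with
  | nil => intro k acc _; simp [PySem.List.enumerate]
  | cons x t ih =>
    intro k acc hdrop
    have hk : k < cs.length := by
      by_contra hc
      rw [List.drop_eq_nil_of_le (by omega)] at hdrop
      exact (List.cons_ne_nil x t) hdrop.symm
    have hx : cs[k] = x := by
      rw [List.drop_eq_getElem_cons hk] at hdrop
      exact (List.cons.injEq _ _ _ _ ▸ hdrop).1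
    have ht : List.drop (k + 1) cs = t := by
      rw [List.drop_eq_getElem_cons hk] at hdrop
      exact (List.cons.injEq _ _ _ _ ▸ hdrop).2
    rw [PySem.List.enumerate, List.foldl_cons]
    have hcast : (k : Int) + 1 = ((k + 1 : Nat) : Int) := by push_cast; ring
    rw [hcast, ih (k + 1)]
    · have hstep : (fun kd => pvStartswithFrom cs kd.1 ((k : Nat) : Int)) =
          (fun kd : List Char × Char => kd.1.isPrefixOf (List.drop k cs)) := by
        funext kd; rw [pvStartswithFrom_natCast]
      have hmatch : pvMatch cs k =
          (if '0' ≤ x ∧ x ≤ '9' then some x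
           else ((pvBucket x).find? (fun kd => kd.1.isPrefixOf (x :: t))).map (·.2)) := by
        rw [pvMatch, hdrop]
        exact (pvBridge x t).symm
      simp only [List.length_cons, List.range'_succ, List.filterMap_cons, hstep, hdrop]
      rw [hmatch]
      by_cases hdig : '0' ≤ x ∧ x ≤ '9'
      · simp [hdig]
      · rw [if_neg hdig, if_neg hdig]
        cases hf : (pvBucket x).find? (fun kd => kd.1.isPrefixOf (x :: t)) with
        | none => simp
        | some kd => simp
    · exact ht

-- ===== VERDICT (by name: the statement is the Claim_ definition above) =====
theorem decodeStringToNumbers_spec : Claim_equal_decodeStringToNumbers := by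
  intro str _
  unfold Spec_decodeStringToNumbers decodeStringToNumbers decodeStringToNumbers_alt
  dsimp only
  set cs := str.toList with hcs
  set n := cs.length with hn
  -- A side: characterize the decoded placeholder string
  obtain ⟨hlen, hget⟩ := pvLoop_char cs pvDigitDict (fun x hx => hx)
    (List.replicate n ' ') (by simp [hn])
  set dec := pvDigitDict.foldl
    (fun dec kd =>
      let index := findIndexesOfStrings cs kd.1
      if index = [] then dec
      else replaceCharsAtIndexes dec index [kd.2]) (List.replicate n ' ') with hdec
  have hdecmap : dec = (List.range n).map (fun j => (pvMatch cs j).getD ' ') := by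
    apply List.ext_getElem?
    intro j
    by_cases hj : j < n
    · rw [hget j hj]
      rw [List.getElem?_map, List.getElem?_range hj]
      simp only [pvMatch]
      cases hf : pvDigitDict.find? (fun kd => kd.1.isPrefixOf (List.drop j cs)) with
      | none => simp [hj, hf]
      | some kd => simp [hf]
    · rw [List.getElem?_eq_none (by rw [hlen]; omega),
        List.getElem?_eq_none (by simp; omega)]
  -- both sides reduce to the filterMap of matches over the positions
  rw [hdecmap, pvReplace_filter, pvFilter_map_getD]
  rw [show (PySem.List.enumerate cs : List (Int × Char)) = PySem.List.enumerate cs ((0 : Nat) : Int) from rfl]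
  rw [pvFoldB cs cs 0 [] (by simp)]
  rw [List.range_eq_range']
  rfl
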